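-- pv_equiv track=rewrite | github.com/k2room/CAPA-3DSG | dataset/annotation_statistic.py | count_affordances
-- ===== SOURCE A (Python) =====
-- from typing import Dict, List, Any, Optional
--
-- AFFORDANCE_CHOICES = [
--     "",  # blank allowed
--     "rotate",
--     "key_press",
--     "tip_push",
--     "hook_pull",
--     "pinch_pull",
--     "hook_turn",
--     "foot_push",
--     "plug_in",
--     "unplug",
-- ]
--
-- def count_affordances(ann_list: List[Dict[str, Any]]) -> Dict[str, int]:
--     counts: Dict[str, int] = {a: 0 for a in AFFORDANCE_CHOICES if a != ""}
--
--     for ann in ann_list: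
--         aff = ann.get("affordance", [])
--         if not isinstance(aff, list):
--             continue
--
--         # Count unique labels per object (avoid double counting duplicates in one entry)
--         for a in set(aff):
--             if a in counts:
--                 counts[a] += 1
--
--     return counts
-- ===== SOURCE B (Python) =====
-- from typing import Dict, List, Any
--
-- AFFORDANCE_CHOICES = [
--     "",  # blank allowed
--     "rotate",
--     "key_press",
--     "tip_push",
--     "hook_pull",
--     "pinch_pull",
--     "hook_turn",
--     "foot_push",
--     "plug_in",
--     "unplug",
-- ]
--
-- def count_affordances(ann_list: List[Dict[str, Any]]) -> Dict[str, int]: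
--     # Inverted iteration: for each valid label, count the annotations whose
--     # affordance list mentions it (membership already deduplicates per entry).
--     def mentions(ann, a):
--         aff = ann.get("affordance", [])
--         return isinstance(aff, list) and a in aff
--     return {a: sum(1 for ann in ann_list if mentions(ann, a))
--             for a in AFFORDANCE_CHOICES if a != ""}
-- ===== Notes on version B (the rewrite author's own statement) =====
-- stated objective: alternative
-- what changed: Instead of a single pass over annotations updating a pre-initialised counts dict via per-entry set iteration, B maps each valid affordance label to the number of annotations whose affordance list contains it (membership test replaces per-entry deduplication).
import Mathlib
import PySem

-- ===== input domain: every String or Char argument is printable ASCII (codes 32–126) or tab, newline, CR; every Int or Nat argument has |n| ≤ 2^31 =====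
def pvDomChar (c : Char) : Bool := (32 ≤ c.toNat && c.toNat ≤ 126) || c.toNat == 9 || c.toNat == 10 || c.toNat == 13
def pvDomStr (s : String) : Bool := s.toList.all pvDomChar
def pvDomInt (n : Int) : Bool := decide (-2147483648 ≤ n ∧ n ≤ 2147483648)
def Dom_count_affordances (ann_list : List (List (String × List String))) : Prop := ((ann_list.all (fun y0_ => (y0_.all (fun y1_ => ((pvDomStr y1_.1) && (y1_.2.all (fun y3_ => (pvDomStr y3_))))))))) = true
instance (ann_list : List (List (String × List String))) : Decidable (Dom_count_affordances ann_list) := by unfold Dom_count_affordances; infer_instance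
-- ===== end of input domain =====

-- B inverts the iteration: instead of one pass over the annotations updating a counts dict,
-- it maps each valid label to the number of annotations whose affordance list mentions it
-- (objective: alternative decomposition; same value, same key order).

-- AFFORDANCE_CHOICES (module-level constant used by both programs)
def affordanceChoices : List String :=
  ["", "rotate", "key_press", "tip_push", "hook_pull", "pinch_pull",
   "hook_turn", "foot_push", "plug_in", "unplug"]

-- ann.get("affordance", []) — first-match lookup in the annotation dict
def getAff (ann : List (String × List String)) : List String :=
  (PySem.Dict.mk ann).getD "affordance" []

-- ===== PORT A =====
-- `if a in counts: counts[a] += 1` for one element of set(aff)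
def aInnerStep (c : PySem.Dict String Int) (a : String) : PySem.Dict String Int :=
  if c.contains a then c.modify a 0 (· + 1) else c

-- body of A's outer loop; the `isinstance(aff, list)` guard is vacuous under the port's
-- types (the affordance value is always a list), so it has no Lean counterpart
def aStep (counts : PySem.Dict String Int) (ann : List (String × List String)) :
    PySem.Dict String Int :=
  (PySem.Set.ofList (getAff ann)).foldl aInnerStep counts

def count_affordances (ann_list : List (List (String × List String))) : List (String × Int) :=
  let counts0 : PySem.Dict String Int :=
    (affordanceChoices.filter (fun a => a ≠ "")).foldl
      (fun d a => d.insert a 0) PySem.Dict.empty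
  (ann_list.foldl aStep counts0).items

-- ===== PORT B =====
-- mentions(ann, a): `a in ann.get("affordance", [])` (isinstance guard vacuous, as above)
def mentions (ann : List (String × List String)) (a : String) : Bool :=
  (getAff ann).contains a

def count_affordances_alt (ann_list : List (List (String × List String))) :
    List (String × Int) :=
  (affordanceChoices.filter (fun a => a ≠ "")).map (fun a =>
    (a, (ann_list.map (fun ann => if mentions ann a then (1 : Int) else 0)).sum))

-- ===== PRECONDITION & SPEC =====
def Spec_count_affordances (ann_list : List (List (String × List String))) (out : List (String × Int)) : Prop := out = count_affordances_alt ann_list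
instance (ann_list : List (List (String × List String))) (out : List (String × Int)) : Decidable (Spec_count_affordances ann_list out) := by unfold Spec_count_affordances; infer_instance

-- ===== CLAIM (what is proved, stated in full; the proofs are below) =====
def Claim_equal_count_affordances : Prop := ∀ (ann_list : List (List (String × List String))), Dom_count_affordances ann_list → Spec_count_affordances ann_list (count_affordances ann_list)

-- ===== LEMMAS AND PROOFS =====

-- the inner per-entry loop never changes the key list
theorem keys_aInnerStep (c : PySem.Dict String Int) (a : String) :
    (aInnerStep c a).keys = c.keys := by
  unfold aInnerStep
  by_cases h : c.contains a = true
  · simp only [h, if_true, PySem.Dict.keys_modify]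
    exact PySem.Dict.keys_insert_of_contains c _ h
  · simp [h]

theorem keys_foldl_aInnerStep (s : List String) (c : PySem.Dict String Int) :
    (s.foldl aInnerStep c).keys = c.keys := by
  induction s generalizing c with
  | nil => rfl
  | cons a s ih => simp [List.foldl_cons, ih, keys_aInnerStep]

theorem contains_aInnerStep (c : PySem.Dict String Int) (a k : String) :
    (aInnerStep c a).contains k = c.contains k := by
  rw [PySem.Dict.contains_eq_decide_mem_keys, PySem.Dict.contains_eq_decide_mem_keys,
    keys_aInnerStep]

theorem contains_foldl_aInnerStep (s : List String) (c : PySem.Dict String Int) (k : String) :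
    (s.foldl aInnerStep c).contains k = c.contains k := by
  rw [PySem.Dict.contains_eq_decide_mem_keys, PySem.Dict.contains_eq_decide_mem_keys,
    keys_foldl_aInnerStep]

-- the inner loop adds 1 at key l exactly when l occurs in s and is a tracked key
theorem getD_foldl_aInnerStep (s : List String) (hs : s.Nodup)
    (c : PySem.Dict String Int) (l : String) :
    (s.foldl aInnerStep c).getD l 0 =
      c.getD l 0 + (if l ∈ s ∧ c.contains l = true then 1 else 0) := by
  induction s generalizing c with
  | nil => simp
  | cons a s ih =>
    rcases List.nodup_cons.mp hs with ⟨ha, hs'⟩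
    rw [List.foldl_cons, ih hs', contains_aInnerStep]
    unfold aInnerStep
    by_cases hc : c.contains a = true
    · simp only [hc, if_true]
      rw [PySem.Dict.getD_modify]
      by_cases hla : l = a
      · subst hla
        have hls : l ∉ s := ha
        simp [hls, hc]
      · simp [hla, List.mem_cons]
    · simp only [hc]
      by_cases hla : l = a
      · subst hla
        simp [ha, hc]
      · simp [hla, List.mem_cons]

-- the outer loop adds, at each tracked key l, the number of annotations mentioning l
theorem getD_foldl_aStep (xs : List (List (String × List String)))
    (c : PySem.Dict String Int) (l : String) (hl : c.contains l = true) :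
    (xs.foldl aStep c).getD l 0 =
      c.getD l 0 + (xs.countP (fun ann => mentions ann l) : Int) := by
  induction xs generalizing c with
  | nil => simp
  | cons ann xs ih =>
    have hl' : (aStep c ann).contains l = true := by
      rw [show aStep c ann = (PySem.Set.ofList (getAff ann)).foldl aInnerStep c from rfl,
        contains_foldl_aInnerStep]
      exact hl
    rw [List.foldl_cons, ih _ hl']
    rw [show aStep c ann = (PySem.Set.ofList (getAff ann)).foldl aInnerStep c from rfl,
      getD_foldl_aInnerStep _ (PySem.Set.nodup_ofList _) c l]
    rw [List.countP_cons]
    have hmem : l ∈ PySem.Set.ofList (getAff ann) ↔ l ∈ getAff ann :=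
      PySem.Set.mem_ofList _ _
    by_cases hm : mentions ann l = true
    · have : l ∈ PySem.Set.ofList (getAff ann) := hmem.mpr (by
        simpa [mentions, List.contains_iff_mem] using hm)
      simp [this, hl, hm]
      ring
    · have : l ∉ PySem.Set.ofList (getAff ann) := fun h => hm (by
        simpa [mentions, List.contains_iff_mem] using hmem.mp h)
      simp [this, hm]

-- proof-side abbreviations for the literal label list and A's initial dict
def labelsA : List String := affordanceChoices.filter (fun a => a ≠ "")
def c0A : PySem.Dict String Int :=
  labelsA.foldl (fun d a => d.insert a 0) PySem.Dict.empty

theorem keys_foldl_aStep (xs : List (List (String × List String)))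
    (c : PySem.Dict String Int) : (xs.foldl aStep c).keys = c.keys := by
  induction xs generalizing c with
  | nil => rfl
  | cons ann xs ih =>
    rw [List.foldl_cons, ih,
      show aStep c ann = (PySem.Set.ofList (getAff ann)).foldl aInnerStep c from rfl,
      keys_foldl_aInnerStep]

-- ===== VERDICT (by name: the statement is the Claim_ definition above) =====

set_option maxHeartbeats 1000000 in
theorem count_affordances_spec : Claim_equal_count_affordances := by
  intro ann_list _
  unfold Spec_count_affordances count_affordances count_affordances_alt
  rw [show affordanceChoices.filter (fun a => a ≠ "") = labelsA from rfl]
  rw [show labelsA.foldl (fun d a => d.insert a 0) PySem.Dict.empty = c0A from rfl]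
  have hkeys : (ann_list.foldl aStep c0A).keys = labelsA := by
    rw [keys_foldl_aStep]; decide
  have hnd : (ann_list.foldl aStep c0A).keys.Nodup := by rw [hkeys]; decide
  rw [PySem.Dict.items_eq_map_keys _ hnd 0, hkeys]
  apply List.map_congr_left
  intro a ha
  have hfacts : ∀ x ∈ labelsA, c0A.contains x = true ∧ c0A.getD x 0 = 0 := by decide
  rw [getD_foldl_aStep _ _ _ (hfacts a ha).1, (hfacts a ha).2,
    PySem.List.sum_map_ite_one_zero (fun ann => mentions ann a) ann_list]
  simp
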